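-- pv_equiv track=rewrite | github.com/Amedar-Asterisk/U-Statistics-python | U2V.py | encode_partition
-- ===== SOURCE A (Python) =====
-- from typing import List, Set
--
-- def encode_partition(partition: List[Set[int]]) -> List[int]:
--     """
--     Encode a partition using the minimum value of each subset.
--
--     Args:
--         partition (List[Set[int]]): A partition of numbers, where each subset is represented as a set of integers.
--
--     Returns:
--         List[int]: A list of length m, where each element represents the minimum value of the subset containing that number.
--
--     Example:
--         >>> encode_partition([{0, 1, 2}, {3}])
--         [0, 0, 0, 3]
--     """
--     # Create a mapping from each number to the minimum value of its subset
--     num_to_min = {}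
--     for subset in partition:
--         min_val = min(subset)
--         for num in subset:
--             num_to_min[num] = min_val
--
--     # Determine the maximum number to know the size of the encoded list
--     max_num = max(num_to_min.keys(), default=-1)
--
--     # Build the encoded list
--     encoded = []
--     for num in range(max_num + 1):
--         if num in num_to_min:
--             encoded.append(num_to_min[num])
--         else:
--             # Handle numbers not in any subset (if necessary)
--             encoded.append(-1)  # or raise an error, depending on requirements
--
--     return encoded
-- ===== SOURCE B (Python) =====
-- def encode_partition(partition):
--     # Gather approach: no num->min mapping is built.  For each output index
--     # num in 0..max, search the subsets (in reverse, so that on overlaps the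
--     # last subset wins, as a dict rebuild would) for one containing num and
--     # emit that subset's minimum; -1 if no subset contains num.
--     max_num = max((num for subset in partition for num in subset), default=-1)
--
--     def code(num):
--         for subset in reversed(partition):
--             if num in subset:
--                 return min(subset)
--         return -1
--
--     return [code(num) for num in range(max_num + 1)]
-- ===== Notes on version B (the rewrite author's own statement) =====
-- stated objective: alternative
-- what changed: Replaces A's scatter (build a num->min dict, then read it over range(max+1)) by a gather with no mapping at all: for each output index it searches the subsets in reverse for the first one containing it and emits that subset's minimum.
import Mathlib
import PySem

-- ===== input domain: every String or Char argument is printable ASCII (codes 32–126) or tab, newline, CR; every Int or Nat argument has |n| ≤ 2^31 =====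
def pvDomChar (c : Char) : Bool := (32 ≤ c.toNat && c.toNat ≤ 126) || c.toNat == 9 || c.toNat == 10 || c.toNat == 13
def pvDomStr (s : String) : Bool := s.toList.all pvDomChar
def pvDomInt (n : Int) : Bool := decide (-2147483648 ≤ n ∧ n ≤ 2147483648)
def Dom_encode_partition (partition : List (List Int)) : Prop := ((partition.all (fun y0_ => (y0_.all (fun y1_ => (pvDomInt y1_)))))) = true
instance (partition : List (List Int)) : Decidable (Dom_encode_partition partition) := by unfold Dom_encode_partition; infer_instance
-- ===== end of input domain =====

-- B drops A's num->min dict entirely: for each output index it searches the subsets in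
-- reverse for the first one containing it and emits that subset's minimum (alternative
-- gather instead of scatter; return values proved equal).

-- ===== PORT A =====
def encode_partition (partition : List (List Int)) : List Int :=
  let num_to_min : PySem.Dict Int Int :=
    partition.foldl (fun d subset =>
      let min_val : Int := (PySem.List.min? subset (fun x => x)).getD 0
      subset.foldl (fun d num => d.insert num min_val) d) PySem.Dict.empty
  let max_num : Int := (PySem.List.max? num_to_min.keys (fun x => x)).getD (-1)
  (PySem.List.pyRange 0 (max_num + 1) 1).foldl
    (fun enc num =>
      match num_to_min.get? num with
      | some v => enc ++ [v]
      | none => enc ++ [(-1 : Int)]) []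

-- ===== PORT B =====
-- the inner helper `code`: first subset of reversed(partition) containing num, its min; else -1
def pvCode (partition : List (List Int)) (num : Int) : Int :=
  match partition.reverse.find? (fun s => s.contains num) with
  | some s => (PySem.List.min? s (fun x => x)).getD 0
  | none => -1

def encode_partition_alt (partition : List (List Int)) : List Int :=
  let max_num : Int := (PySem.List.max? partition.flatten (fun x => x)).getD (-1)
  (PySem.List.pyRange 0 (max_num + 1) 1).map (fun num => pvCode partition num)

-- ===== PRECONDITION & SPEC =====
-- Pre_ excludes partitions containing an empty subset: there Python's min(subset) raises ValueError in A.
def Pre_encode_partition (partition : List (List Int)) : Prop :=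
  ∀ s ∈ partition, s ≠ []
instance (partition : List (List Int)) : Decidable (Pre_encode_partition partition) := by unfold Pre_encode_partition; infer_instance
def pvWitness_encode_partition : List (List Int) := [[0, 1, 2], [3]]
def Spec_encode_partition (partition : List (List Int)) (out : List Int) : Prop := out = encode_partition_alt partition
instance (partition : List (List Int)) (out : List Int) : Decidable (Spec_encode_partition partition out) := by unfold Spec_encode_partition; infer_instance

-- ===== CLAIM (what is proved, stated in full; the proofs are below) =====
def Claim_equal_encode_partition : Prop := ∀ (partition : List (List Int)), Dom_encode_partition partition → Pre_encode_partition partition → Spec_encode_partition partition (encode_partition partition)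

-- ===== LEMMAS AND PROOFS =====

-- the dict A builds (zeta-reduced form of the fold in the port)
def pvDictOf (partition : List (List Int)) : PySem.Dict Int Int :=
  partition.foldl (fun d subset =>
    subset.foldl (fun d num => d.insert num ((PySem.List.min? subset (fun x => x)).getD 0)) d) PySem.Dict.empty

-- membership in the dict's keys = membership in some subset
lemma pv_mem_keys_inner (s : List Int) (v : Int) (d : PySem.Dict Int Int) (x : Int) :
    x ∈ (s.foldl (fun d num => d.insert num v) d).keys ↔ x ∈ s ∨ x ∈ d.keys := by
  induction s generalizing d with
  | nil => simp
  | cons a t ih =>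
    simp only [List.foldl_cons, ih, PySem.Dict.mem_keys_insert, List.mem_cons]
    tauto

lemma pv_mem_keys (P : List (List Int)) (d : PySem.Dict Int Int) (x : Int) :
    x ∈ (P.foldl (fun d subset =>
      subset.foldl (fun d num => d.insert num ((PySem.List.min? subset (fun x => x)).getD 0)) d) d).keys
      ↔ x ∈ P.flatten ∨ x ∈ d.keys := by
  induction P generalizing d with
  | nil => simp
  | cons s t ih =>
    simp only [List.foldl_cons, ih, pv_mem_keys_inner, List.flatten_cons, List.mem_append]
    tauto

-- two lists with the same members have the same max?-value
lemma pv_max_congr (l l' : List Int) (h : ∀ x, x ∈ l ↔ x ∈ l') :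
    (PySem.List.max? l (fun x => x)).getD (-1) = (PySem.List.max? l' (fun x => x)).getD (-1) := by
  cases hl : PySem.List.max? l (fun x => x) with
  | none =>
    have h0 : l = [] := (PySem.List.max?_eq_none_iff _ _).mp hl
    have h1 : l' = [] := by
      cases l' with
      | nil => rfl
      | cons a t => exact absurd ((h a).mpr (List.mem_cons_self)) (by simp [h0])
    subst h0; subst h1; rfl
  | some m =>
    cases hl' : PySem.List.max? l' (fun x => x) with
    | none =>
      have : l' = [] := (PySem.List.max?_eq_none_iff _ _).mp hl'
      have hm := PySem.List.max?_mem hl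
      exact absurd ((h m).mp hm) (by simp [this])
    | some m' =>
      have h1 : m ≤ m' := by simpa using PySem.List.max?_isMax hl' m ((h m).mp (PySem.List.max?_mem hl))
      have h2 : m' ≤ m := by simpa using PySem.List.max?_isMax hl m' ((h m').mpr (PySem.List.max?_mem hl'))
      simp [le_antisymm h1 h2]

-- one subset's insert loop, looked up
lemma pv_get_inner (s : List Int) (v : Int) (d : PySem.Dict Int Int) (k : Int) :
    (s.foldl (fun d num => d.insert num v) d).get? k
      = if s.contains k then some v else d.get? k := by
  induction s generalizing d with
  | nil => simp
  | cons a t ih =>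
    simp only [List.foldl_cons, ih, PySem.Dict.get?_insert]
    by_cases hk : k ∈ t <;> by_cases hka : k = a <;> simp [hk, hka]

-- the dict's lookup = reverse-find of the last containing subset
lemma pv_get_dict (P : List (List Int)) (d : PySem.Dict Int Int) (k : Int) :
    (P.foldl (fun d subset =>
      subset.foldl (fun d num => d.insert num ((PySem.List.min? subset (fun x => x)).getD 0)) d) d).get? k
      = match P.reverse.find? (fun s => s.contains k) with
        | some s => some ((PySem.List.min? s (fun x => x)).getD 0)
        | none => d.get? k := by
  induction P generalizing d with
  | nil => simp
  | cons s t ih =>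
    simp only [List.foldl_cons, ih, List.reverse_cons, List.find?_append]
    cases h : t.reverse.find? (fun s => s.contains k) with
    | some s' => simp
    | none =>
      simp only [Option.none_or]
      by_cases hk : k ∈ s
      · simp [List.find?, hk, pv_get_inner]
      · simp [List.find?, hk, pv_get_inner]

-- A's output loop appends one lookup per range element
lemma pv_out_loop (D : PySem.Dict Int Int) (r : List Int) (acc : List Int) :
    r.foldl (fun enc num => match D.get? num with
      | some v => enc ++ [v]
      | none => enc ++ [(-1 : Int)]) acc
      = acc ++ r.map (fun num => ((D.get? num).getD (-1))) := by
  induction r generalizing acc with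
  | nil => simp
  | cons a t ih =>
    simp only [List.foldl_cons, List.map_cons, ih]
    cases D.get? a <;> simp

-- ===== VERDICT (by name: the statement is the Claim_ definition above) =====
theorem encode_partition_spec : Claim_equal_encode_partition := by
  intro partition _hDom _hPre
  unfold Spec_encode_partition
  simp only [encode_partition, encode_partition_alt]
  rw [pv_out_loop, List.nil_append]
  have hmax : (PySem.List.max? (pvDictOf partition).keys (fun x => x)).getD (-1)
      = (PySem.List.max? partition.flatten (fun x => x)).getD (-1) := by
    apply pv_max_congr
    intro x
    rw [show (pvDictOf partition).keys = (partition.foldl (fun d subset =>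
      subset.foldl (fun d num => d.insert num ((PySem.List.min? subset (fun x => x)).getD 0)) d)
      PySem.Dict.empty).keys from rfl, pv_mem_keys]
    simp
  rw [show (PySem.List.max? (List.foldl (fun d subset =>
        List.foldl (fun d num => d.insert num ((PySem.List.min? subset fun x => x).getD 0)) d subset)
        PySem.Dict.empty partition).keys (fun x => x)).getD (-1)
      = (PySem.List.max? (pvDictOf partition).keys (fun x => x)).getD (-1) from rfl, hmax]
  congr 1
  funext k
  rw [pv_get_dict, pvCode]
  cases h : partition.reverse.find? (fun s => s.contains k) with
  | some s => simp
  | none => simp [PySem.Dict.get?_empty]
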